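-- pv_equiv track=rewrite | github.com/BilalKhawaja-dev/LiveStream | modules/lambda/functions/support_handler.py | determine_ticket_type
-- ===== SOURCE A (Python) =====
-- from typing import Dict, Any, Optional, List
--
-- def determine_ticket_type(keywords: List[str]) -> str:
--     """Determine ticket type based on keywords"""
--     type_priorities = [
--         ('billing', ['billing', 'payment']),
--         ('technical', ['technical', 'streaming', 'error']),
--         ('account', ['password', 'account']),
--         ('content', ['streaming', 'video']),
--         ('general', [])  # Default
--     ]
--
--     for ticket_type, type_keywords in type_priorities:
--         if any(keyword in keywords for keyword in type_keywords):
--             return ticket_type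
--
--     return 'general'
-- ===== SOURCE B (Python) =====
-- def determine_ticket_type(keywords):
--     """Determine ticket type based on keywords"""
--     types = ['billing', 'technical', 'account', 'content']
--     index = {'billing': 0, 'payment': 0,
--              'technical': 1, 'streaming': 1, 'error': 1,
--              'password': 2, 'account': 2,
--              'video': 3}
--     best = None
--     for kw in keywords:
--         i = index.get(kw)
--         if i is not None and (best is None or i < best):
--             best = i
--     return types[best] if best is not None else 'general'
-- ===== Notes on version B (the rewrite author's own statement) =====
-- stated objective: alternative
-- what changed: Replaces the scan of the priority list with repeated membership tests over the input by a prebuilt keyword-to-priority-index table and a single pass over the input keywords keeping the minimum matched index.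
import Mathlib
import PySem

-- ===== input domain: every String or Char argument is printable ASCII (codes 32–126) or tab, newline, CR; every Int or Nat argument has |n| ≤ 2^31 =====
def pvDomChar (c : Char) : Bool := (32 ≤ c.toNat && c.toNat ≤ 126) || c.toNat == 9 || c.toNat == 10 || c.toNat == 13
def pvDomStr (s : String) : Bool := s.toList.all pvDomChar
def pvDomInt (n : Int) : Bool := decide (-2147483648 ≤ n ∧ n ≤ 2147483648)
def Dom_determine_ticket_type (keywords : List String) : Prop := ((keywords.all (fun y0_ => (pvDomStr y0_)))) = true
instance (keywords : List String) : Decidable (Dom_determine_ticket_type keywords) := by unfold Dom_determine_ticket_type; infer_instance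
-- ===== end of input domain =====

-- B replaces A's priority-list scan (membership test per trigger keyword) by a prebuilt
-- keyword→priority-index table and one pass over the input keeping the minimum matched index.

-- ===== PORT A =====
-- the for-loop over type_priorities, returning on the first type with a trigger present
def pvALoop (keywords : List String) : List (String × List String) → String
  | [] => "general"
  | (t, tks) :: rest =>
      if tks.any (fun kw => keywords.contains kw) then t else pvALoop keywords rest

def determine_ticket_type (keywords : List String) : String :=
  pvALoop keywords
    [("billing", ["billing", "payment"]),
     ("technical", ["technical", "streaming", "error"]),
     ("account", ["password", "account"]),
     ("content", ["streaming", "video"]),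
     ("general", [])]

-- ===== PORT B =====
def pvIndex : PySem.Dict String Nat :=
  PySem.Dict.ofList
    [("billing", 0), ("payment", 0),
     ("technical", 1), ("streaming", 1), ("error", 1),
     ("password", 2), ("account", 2),
     ("video", 3)]

-- the loop body: keep the smaller matched index
def pvStep (best : Option Nat) (kw : String) : Option Nat :=
  match PySem.Dict.get? pvIndex kw with
  | none => best
  | some i =>
      match best with
      | none => some i
      | some b => if i < b then some i else some b

def determine_ticket_type_alt (keywords : List String) : String :=
  let types := ["billing", "technical", "account", "content"]
  let best := keywords.foldl pvStep none
  -- types[best]: best is always < 4 here, so getD is exact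
  match best with
  | some b => types.getD b "general"
  | none => "general"

-- ===== PRECONDITION & SPEC =====
def Spec_determine_ticket_type (keywords : List String) (out : String) : Prop := out = determine_ticket_type_alt keywords
instance (keywords : List String) (out : String) : Decidable (Spec_determine_ticket_type keywords out) := by unfold Spec_determine_ticket_type; infer_instance

-- ===== CLAIM (what is proved, stated in full; the proofs are below) =====
def Claim_equal_determine_ticket_type : Prop := ∀ (keywords : List String), Dom_determine_ticket_type keywords → Spec_determine_ticket_type keywords (determine_ticket_type keywords)

-- ===== LEMMAS AND PROOFS =====

-- option-min combine
def pvOmin (a b : Option Nat) : Option Nat :=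
  match a, b with
  | none, b => b
  | a, none => a
  | some x, some y => some (min x y)

theorem pvOmin_none (a : Option Nat) : pvOmin a none = a := by cases a <;> rfl

theorem pvOmin_assoc (a b c : Option Nat) : pvOmin (pvOmin a b) c = pvOmin a (pvOmin b c) := by
  cases a <;> cases b <;> cases c <;> simp [pvOmin, Nat.min_assoc]

theorem pvStep_eq (best : Option Nat) (kw : String) :
    pvStep best kw = pvOmin best (PySem.Dict.get? pvIndex kw) := by
  unfold pvStep
  cases h : PySem.Dict.get? pvIndex kw with
  | none => cases best <;> simp [pvOmin]
  | some i =>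
      cases best with
      | none => simp [pvOmin]
      | some b =>
          simp only [pvOmin]
          rcases Nat.lt_or_ge i b with hlt | hge
      
          · simp [hlt, Nat.min_eq_right (Nat.le_of_lt hlt)]
          · simp [Nat.not_lt.mpr hge, Nat.min_eq_left hge]

-- the fold computes the pvOmin of the accumulator with the minimum matched index
theorem pvFold_char (l : List String) (acc : Option Nat) :
    l.foldl pvStep acc = pvOmin acc (l.foldl pvStep none) := by
  induction l generalizing acc with
  | nil => simp [List.foldl, pvOmin_none]
  | cons k t ih =>
      simp only [List.foldl]
      rw [ih (pvStep acc k), ih (pvStep none k), pvStep_eq, pvStep_eq none k,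
        pvOmin_assoc]
      rfl

-- lookup in the literal table, as an if-chain on the key
set_option maxHeartbeats 1000000 in
theorem pvGet_char (k : String) : PySem.Dict.get? pvIndex k =
    if k = "billing" then some 0 else if k = "payment" then some 0
    else if k = "technical" then some 1 else if k = "streaming" then some 1
    else if k = "error" then some 1 else if k = "password" then some 2
    else if k = "account" then some 2 else if k = "video" then some 3
    else none := by
  have : pvIndex = PySem.Dict.mk
      [("billing", 0), ("payment", 0),
       ("technical", 1), ("streaming", 1), ("error", 1),
       ("password", 2), ("account", 2),
       ("video", 3)] := by rfl
  rw [this]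
  simp only [PySem.Dict.get?_mk_cons, beq_iff_eq, @eq_comm String k]
  rfl

-- characterisation of the single-pass minimum by the same membership tests A performs
theorem pvBest_char (l : List String) :
    l.foldl pvStep none =
      if l.contains "billing" || l.contains "payment" then some 0
      else if l.contains "technical" || l.contains "streaming" || l.contains "error" then some 1
      else if l.contains "password" || l.contains "account" then some 2
      else if l.contains "streaming" || l.contains "video" then some 3
      else none := by
  induction l with
  | nil => simp
  | cons k t ih =>
      have h1 : (k :: t).foldl pvStep none = pvOmin (PySem.Dict.get? pvIndex k) (t.foldl pvStep none) := by
        show t.foldl pvStep (pvStep none k) = _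
        rw [pvFold_char, pvStep_eq]
        rfl
      rw [h1, ih, pvGet_char k]
      by_cases h1 : k = "billing"
      · subst h1; simp; split_ifs <;> simp [pvOmin]
      by_cases h2 : k = "payment"
      · subst h2; simp; split_ifs <;> simp [pvOmin]
      by_cases h3 : k = "technical"
      · subst h3; simp; split_ifs <;> simp [pvOmin]
      by_cases h4 : k = "streaming"
      · subst h4; simp; split_ifs <;> simp [pvOmin]
      by_cases h5 : k = "error"
      · subst h5; simp; split_ifs <;> simp [pvOmin]
      by_cases h6 : k = "password"
      · subst h6; simp; split_ifs <;> simp [pvOmin]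
      by_cases h7 : k = "account"
      · subst h7; simp; split_ifs <;> simp [pvOmin]
      by_cases h8 : k = "video"
      · subst h8; simp; split_ifs <;> simp [pvOmin]
      simp [pvOmin, h1, h2, h3, h4, h5, h6, h7, h8,
        Ne.symm h1, Ne.symm h2, Ne.symm h3, Ne.symm h4, Ne.symm h5, Ne.symm h6, Ne.symm h7, Ne.symm h8]

theorem determine_ticket_type_spec : Claim_equal_determine_ticket_type := by
  unfold Claim_equal_determine_ticket_type
  intro keywords _
  unfold Spec_determine_ticket_type determine_ticket_type determine_ticket_type_alt
  rw [pvBest_char]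
  simp only [pvALoop, List.any_cons, List.any_nil, Bool.or_false, Bool.or_assoc]
  split_ifs <;> rfl
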